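-- pv_equiv track=rewrite | github.com/omidrohanian/Wayback-Export-Toolkit | src/wayback_export/selection.py | parse_selection_expression
-- ===== SOURCE A (Python) =====
-- from typing import List, Sequence
--
-- def parse_selection_expression(expression: str, total: int) -> List[int]:
--     expr = expression.strip().lower()
--     if expr in {"all", "*"}:
--         return list(range(total))
--     selected = set()
--     for part in expr.split(","):
--         part = part.strip()
--         if not part:
--             continue
--         if "-" in part:
--             start_s, end_s = part.split("-", 1)
--             start = int(start_s)
--             end = int(end_s)
--             if start < 1 or end > total or start > end:
--                 raise ValueError(f"Invalid range: {part}")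
--             for idx in range(start - 1, end):
--                 selected.add(idx)
--         else:
--             value = int(part)
--             if value < 1 or value > total:
--                 raise ValueError(f"Invalid index: {part}")
--             selected.add(value - 1)
--     return sorted(selected)
-- ===== SOURCE B (Python) =====
-- def parse_selection_expression(expression, total):
--     expr = expression.strip().lower()
--     if expr in {"all", "*"}:
--         return list(range(total))
--     bounds = []
--     for raw in expr.split(","):
--         raw = raw.strip()
--         if not raw:
--             continue
--         if "-" in raw:
--             a_s, b_s = raw.split("-", 1)
--         else:
--             a_s, b_s = raw, raw
--         a = int(a_s)
--         b = int(b_s)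
--         if not (1 <= a <= b <= total):
--             raise ValueError(f"Invalid selection part: {raw}")
--         bounds.append((a - 1, b))
--     bounds.sort(key=lambda iv: iv[0])
--     out = []
--     cursor = 0
--     for lo, hi in bounds:
--         out.extend(range(max(lo, cursor), hi))
--         cursor = max(cursor, hi)
--     return out
-- ===== Notes on version B (the rewrite author's own statement) =====
-- stated objective: alternative
-- what changed: B normalises every comma part through one unified parse branch into a half-open (start-1, end) bound pair (a single value v becomes the pair for v-v), collects these intervals, sorts them by start and expands them in a single cursor sweep, instead of A's per-index set insertion followed by a final sort of the points.
import Mathlib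
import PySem

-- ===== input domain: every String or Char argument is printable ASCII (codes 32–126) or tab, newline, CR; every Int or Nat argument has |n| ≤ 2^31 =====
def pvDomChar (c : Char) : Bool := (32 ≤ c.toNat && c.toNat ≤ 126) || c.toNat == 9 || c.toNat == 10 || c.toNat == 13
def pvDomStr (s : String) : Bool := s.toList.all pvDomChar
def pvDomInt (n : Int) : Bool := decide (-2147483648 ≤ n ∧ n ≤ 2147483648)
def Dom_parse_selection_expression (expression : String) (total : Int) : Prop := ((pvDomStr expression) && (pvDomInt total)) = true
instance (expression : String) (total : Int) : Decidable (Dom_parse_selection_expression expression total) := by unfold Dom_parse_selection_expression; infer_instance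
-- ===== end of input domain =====

-- B replaces A's per-index set insertion + final sort by a unified parse of each part into one
-- half-open bound pair (a single value v is treated as the range v-v), then a sort of the pairs
-- by start and one cursor sweep expanding them; objective: alternative algorithm, same result.

-- ===== PORT A =====
-- the loop over expr.split(","); 'part' (= p.strip()) is written out at each use; none = ValueError
def pvLoopA (total : Int) : List (List Char) → PySem.Set Int → Option (PySem.Set Int)
  | [], selected => some selected
  | p :: rest, selected =>
    if PySem.Chars.strip p = [] then pvLoopA total rest selected
    else if PySem.Chars.isIn ['-'] (PySem.Chars.strip p) then
      match PySem.Chars.splitOnMax (PySem.Chars.strip p) ['-'] 1 with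
      | [start_s, end_s] =>
        match PySem.Int.ofChars? start_s, PySem.Int.ofChars? end_s with
        | some start, some e =>
          if start < 1 ∨ e > total ∨ start > e then none
          else pvLoopA total rest ((PySem.List.pyRange (start - 1) e 1).foldl PySem.Set.add selected)
        | _, _ => none
      | _ => none
    else
      match PySem.Int.ofChars? (PySem.Chars.strip p) with
      | some value =>
        if value < 1 ∨ value > total then none
        else pvLoopA total rest (PySem.Set.add selected (value - 1))
      | none => none

def parse_selection_expression (expression : String) (total : Int) : List Int :=
  if PySem.Chars.lower (PySem.Chars.strip expression.toList) = "all".toList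
     ∨ PySem.Chars.lower (PySem.Chars.strip expression.toList) = "*".toList then
    PySem.List.pyRange 0 total 1
  else
    match pvLoopA total (PySem.Chars.splitOn (PySem.Chars.lower (PySem.Chars.strip expression.toList)) [',']) PySem.Set.empty with
    | some selected => PySem.List.sorted selected (fun x => x) false
    | none => []  -- unreachable under Pre_ (A raises ValueError here)

-- ===== PORT B =====
-- the collection loop of Source B: every non-empty part becomes ONE (a-1, b) bound pair through a
-- single unified branch ('a_s, b_s = raw.split("-",1) if "-" in raw else (raw, raw)')
def pvPartsB (total : Int) : List (List Char) → List (Int × Int) → Option (List (Int × Int))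
  | [], bounds => some bounds
  | raw :: rest, bounds =>
    let r := PySem.Chars.strip raw
    if r = [] then pvPartsB total rest bounds
    else
      match (if PySem.Chars.isIn ['-'] r then PySem.Chars.splitOnMax r ['-'] 1 else [r, r]) with
      | [a_s, b_s] =>
        match PySem.Int.ofChars? a_s, PySem.Int.ofChars? b_s with
        | some a, some b =>
          if ¬(1 ≤ a ∧ a ≤ b ∧ b ≤ total) then none
          else pvPartsB total rest (bounds ++ [(a - 1, b)])
        | _, _ => none
      | _ => none

-- 'for lo, hi in bounds: out.extend(range(max(lo,cursor),hi)); cursor = max(cursor,hi)'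
def pvSweep : List (Int × Int) → List Int → Int → List Int
  | [], out, _ => out
  | (lo, hi) :: rest, out, cursor =>
    pvSweep rest (out ++ PySem.List.pyRange (max lo cursor) hi 1) (max cursor hi)

def parse_selection_expression_alt (expression : String) (total : Int) : List Int :=
  if PySem.Chars.lower (PySem.Chars.strip expression.toList) = "all".toList
     ∨ PySem.Chars.lower (PySem.Chars.strip expression.toList) = "*".toList then
    PySem.List.pyRange 0 total 1
  else
    match pvPartsB total (PySem.Chars.splitOn (PySem.Chars.lower (PySem.Chars.strip expression.toList)) [',']) [] with
    | some bounds => pvSweep (PySem.List.sorted bounds (fun iv => iv.1) false) [] 0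
    | none => []  -- unreachable under Pre_ (B raises ValueError here)

-- ===== PRECONDITION & SPEC =====
-- Pre_ excludes exactly the inputs where A raises ValueError: a comma part whose stripped text
-- is non-empty but is not an int / not an int range, or whose value(s) violate the 1..total bounds.
def pvPartOK (p : List Char) (total : Int) : Bool :=
  if PySem.Chars.strip p = [] then true
  else if PySem.Chars.isIn ['-'] (PySem.Chars.strip p) then
    match PySem.Chars.splitOnMax (PySem.Chars.strip p) ['-'] 1 with
    | [start_s, end_s] =>
      match PySem.Int.ofChars? start_s, PySem.Int.ofChars? end_s with
      | some start, some e => decide (1 ≤ start ∧ e ≤ total ∧ start ≤ e)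
      | _, _ => false
    | _ => false
  else
    match PySem.Int.ofChars? (PySem.Chars.strip p) with
    | some value => decide (1 ≤ value ∧ value ≤ total)
    | none => false

def Pre_parse_selection_expression (expression : String) (total : Int) : Prop :=
  PySem.Chars.lower (PySem.Chars.strip expression.toList) = "all".toList
  ∨ PySem.Chars.lower (PySem.Chars.strip expression.toList) = "*".toList
  ∨ ∀ p ∈ PySem.Chars.splitOn (PySem.Chars.lower (PySem.Chars.strip expression.toList)) [','],
      pvPartOK p total = true

instance (expression : String) (total : Int) : Decidable (Pre_parse_selection_expression expression total) := by
  unfold Pre_parse_selection_expression; infer_instance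

def pvWitness_parse_selection_expression : String × Int := ("1-3, 5 ,2", 6)

def Spec_parse_selection_expression (expression : String) (total : Int) (out : List Int) : Prop := out = parse_selection_expression_alt expression total
instance (expression : String) (total : Int) (out : List Int) : Decidable (Spec_parse_selection_expression expression total out) := by unfold Spec_parse_selection_expression; infer_instance

-- ===== CLAIM (what is proved, stated in full; the proofs are below) =====
def Claim_equal_parse_selection_expression : Prop := ∀ (expression : String) (total : Int), Dom_parse_selection_expression expression total → Pre_parse_selection_expression expression total → Spec_parse_selection_expression expression total (parse_selection_expression expression total)

-- ===== LEMMAS AND PROOFS =====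

-- On parts that all pass validation, both loops succeed, B's bound pairs have nonnegative starts,
-- and A's set holds exactly the integers covered by B's pairs.
lemma pvLoop_rel (total : Int) :
    ∀ (parts : List (List Char)), (∀ p ∈ parts, pvPartOK p total = true) →
    ∀ (s : PySem.Set Int) (ivs : List (Int × Int)),
    s.Nodup → (∀ iv ∈ ivs, 0 ≤ iv.1) →
    (∀ i, i ∈ s ↔ ∃ iv ∈ ivs, iv.1 ≤ i ∧ i < iv.2) →
    ∃ s' ivs', pvLoopA total parts s = some s' ∧ pvPartsB total parts ivs = some ivs' ∧
      s'.Nodup ∧ (∀ iv ∈ ivs', 0 ≤ iv.1) ∧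
      (∀ i, i ∈ s' ↔ ∃ iv ∈ ivs', iv.1 ≤ i ∧ i < iv.2) := by
  intro parts
  induction parts with
  | nil =>
    intro _ s ivs hnd hb hrel
    exact ⟨s, ivs, rfl, rfl, hnd, hb, hrel⟩
  | cons p rest ih =>
    intro hok s ivs hnd hb hrel
    have hokp := hok p (List.mem_cons_self ..)
    have hokr : ∀ q ∈ rest, pvPartOK q total = true := fun q hq => hok q (List.mem_cons_of_mem _ hq)
    unfold pvPartOK at hokp
    by_cases hemp : PySem.Chars.strip p = []
    · have hGA : pvLoopA total (p :: rest) s = pvLoopA total rest s := by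
        simp only [pvLoopA]; rw [if_pos hemp]
      have hGB : pvPartsB total (p :: rest) ivs = pvPartsB total rest ivs := by
        simp only [pvPartsB]; rw [if_pos hemp]
      rw [hGA, hGB]
      exact ih hokr s ivs hnd hb hrel
    · rw [if_neg hemp] at hokp
      by_cases hdash : PySem.Chars.isIn ['-'] (PySem.Chars.strip p) = true
      · rw [if_pos hdash] at hokp
        rcases hsp : PySem.Chars.splitOnMax (PySem.Chars.strip p) ['-'] 1 with _ | ⟨a, _ | ⟨b, _ | ⟨c, tl⟩⟩⟩ <;>
          rw [hsp] at hokp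
        · exact Bool.noConfusion hokp
        · exact Bool.noConfusion hokp
        · replace hokp : (match PySem.Int.ofChars? a, PySem.Int.ofChars? b with
              | some start, some e => decide (1 ≤ start ∧ e ≤ total ∧ start ≤ e)
              | _, _ => false) = true := hokp
          rcases ha : PySem.Int.ofChars? a with _ | start <;>
            rcases hb2 : PySem.Int.ofChars? b with _ | e <;>
            rw [ha, hb2] at hokp
          · exact Bool.noConfusion hokp
          · exact Bool.noConfusion hokp
          · exact Bool.noConfusion hokp
          have hbnd : 1 ≤ start ∧ e ≤ total ∧ start ≤ e := of_decide_eq_true hokp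
          obtain ⟨hq1, hq2, hq3⟩ := hbnd
          have hguardA : ¬(start < 1 ∨ e > total ∨ start > e) := by omega
          have hguardB : ¬¬(1 ≤ start ∧ start ≤ e ∧ e ≤ total) := by omega
          have hGA : pvLoopA total (p :: rest) s
              = pvLoopA total rest ((PySem.List.pyRange (start - 1) e 1).foldl PySem.Set.add s) := by
            simp only [pvLoopA]
            rw [if_neg hemp, if_pos hdash, hsp]
            simp only [ha, hb2]
            rw [if_neg hguardA]
          have hGB : pvPartsB total (p :: rest) ivs
              = pvPartsB total rest (ivs ++ [(start - 1, e)]) := by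
            simp only [pvPartsB]
            rw [if_neg hemp, if_pos hdash, hsp]
            simp only [ha, hb2]
            rw [if_neg hguardB]
          rw [hGA, hGB]
          refine ih hokr _ _ ?_ ?_ ?_
          · show (PySem.Set.update s (PySem.List.pyRange (start - 1) e 1)).Nodup
            exact PySem.Set.nodup_update _ _ hnd
          · intro iv hiv
            rcases List.mem_append.1 hiv with h | h
            · exact hb iv h
            · simp only [List.mem_singleton] at h
              subst h
              show (0 : Int) ≤ start - 1
              omega
          · intro i
            show i ∈ PySem.Set.update s (PySem.List.pyRange (start - 1) e 1) ↔ _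
            rw [PySem.Set.mem_update, PySem.List.mem_pyRange_one, hrel i]
            constructor
            · rintro (⟨iv, hm, h1, h2⟩ | h)
              · exact ⟨iv, List.mem_append_left _ hm, h1, h2⟩
              · exact ⟨(start - 1, e), List.mem_append_right _ (List.mem_singleton.2 rfl), h.1, h.2⟩
            · rintro ⟨iv, hm, h1, h2⟩
              rcases List.mem_append.1 hm with h | h
              · exact Or.inl ⟨iv, h, h1, h2⟩
              · simp only [List.mem_singleton] at h
                subst h
                replace h1 : start - 1 ≤ i := h1
                replace h2 : i < e := h2
                exact Or.inr ⟨h1, h2⟩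
        · exact Bool.noConfusion hokp
      · rw [if_neg hdash] at hokp
        rcases hv : PySem.Int.ofChars? (PySem.Chars.strip p) with _ | value
        · rw [hv] at hokp
          exact Bool.noConfusion hokp
        rw [hv] at hokp
        have hbnd : 1 ≤ value ∧ value ≤ total := of_decide_eq_true hokp
        obtain ⟨hq1, hq2⟩ := hbnd
        have hguardA : ¬(value < 1 ∨ value > total) := by omega
        have hguardB : ¬¬(1 ≤ value ∧ value ≤ value ∧ value ≤ total) := by omega
        have hGA : pvLoopA total (p :: rest) s = pvLoopA total rest (PySem.Set.add s (value - 1)) := by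
          simp only [pvLoopA]
          rw [if_neg hemp, if_neg hdash]
          simp only [hv]
          rw [if_neg hguardA]
        have hGB : pvPartsB total (p :: rest) ivs = pvPartsB total rest (ivs ++ [(value - 1, value)]) := by
          simp only [pvPartsB]
          rw [if_neg hemp, if_neg hdash]
          simp only [hv]
          rw [if_neg hguardB]
        rw [hGA, hGB]
        refine ih hokr _ _ (PySem.Set.nodup_add _ _ hnd) ?_ ?_
        · intro iv hiv
          rcases List.mem_append.1 hiv with h | h
          · exact hb iv h
          · simp only [List.mem_singleton] at h
            subst h
            show (0 : Int) ≤ value - 1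
            omega
        · intro i
          rw [PySem.Set.mem_add, hrel i]
          constructor
          · rintro (⟨iv, hm, h1, h2⟩ | h)
            · exact ⟨iv, List.mem_append_left _ hm, h1, h2⟩
            · exact ⟨(value - 1, value), List.mem_append_right _ (List.mem_singleton.2 rfl),
                show value - 1 ≤ i by omega, show i < value by omega⟩
          · rintro ⟨iv, hm, h1, h2⟩
            rcases List.mem_append.1 hm with h | h
            · exact Or.inl ⟨iv, h, h1, h2⟩
            · simp only [List.mem_singleton] at h
              subst h
              replace h1 : value - 1 ≤ i := h1
              replace h2 : i < value := h2
              exact Or.inr (by omega)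

lemma pvSweep_append (L : List (Int × Int)) :
    ∀ (res : List Int) (cur : Int), pvSweep L res cur = res ++ pvSweep L [] cur := by
  induction L with
  | nil => intro res cur; simp [pvSweep]
  | cons iv rest ih =>
    intro res cur
    obtain ⟨lo, hi⟩ := iv
    simp only [pvSweep]
    show pvSweep rest (res ++ PySem.List.pyRange (max lo cur) hi 1) (max cur hi)
        = res ++ pvSweep rest (PySem.List.pyRange (max lo cur) hi 1) (max cur hi)
    rw [ih (res ++ PySem.List.pyRange (max lo cur) hi 1), ih (PySem.List.pyRange (max lo cur) hi 1)]
    exact List.append_assoc ..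

-- the sweep over pairs sorted by start produces a strictly increasing list holding
-- exactly the covered integers that are ≥ cur
lemma pvSweep_spec :
    ∀ (L : List (Int × Int)), L.Pairwise (fun a b => a.1 ≤ b.1) →
    ∀ cur, (pvSweep L [] cur).Pairwise (· < ·) ∧
      (∀ i, i ∈ pvSweep L [] cur ↔ cur ≤ i ∧ ∃ iv ∈ L, iv.1 ≤ i ∧ i < iv.2) := by
  intro L
  induction L with
  | nil => intro _ cur; exact ⟨by simp [pvSweep], by simp [pvSweep]⟩
  | cons iv rest ih =>
    intro hpw cur
    obtain ⟨lo, hi⟩ := iv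
    rw [List.pairwise_cons] at hpw
    obtain ⟨hhead, hrest⟩ := hpw
    obtain ⟨ihp, ihm⟩ := ih hrest (max cur hi)
    have key : pvSweep ((lo, hi) :: rest) [] cur
        = PySem.List.pyRange (max lo cur) hi 1 ++ pvSweep rest [] (max cur hi) := by
      simp only [pvSweep]
      rw [pvSweep_append]
      simp
    rw [key]
    constructor
    · rw [List.pairwise_append]
      refine ⟨PySem.List.pairwise_lt_pyRange_one _ _, ihp, ?_⟩
      intro x hx y hy
      have hx' := PySem.List.mem_pyRange_one.1 hx
      have hy' := ((ihm y).1 hy).1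
      omega
    · intro i
      rw [List.mem_append, PySem.List.mem_pyRange_one, ihm i]
      constructor
      · rintro (⟨h1, h2⟩ | ⟨h1, iv, hm, h2, h3⟩)
        · exact ⟨by omega, (lo, hi), List.mem_cons_self .., show lo ≤ i ∧ i < hi by omega⟩
        · exact ⟨by omega, iv, List.mem_cons_of_mem _ hm, h2, h3⟩
      · rintro ⟨hcur, iv, hm, h2, h3⟩
        rcases List.mem_cons.1 hm with h | h
        · subst h
          replace h2 : lo ≤ i := h2
          replace h3 : i < hi := h3
          left
          omega
        · by_cases hge : max cur hi ≤ i
          · exact Or.inr ⟨hge, iv, h, h2, h3⟩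
          · have := hhead iv h
            left
            omega

-- assembling the results: sorted(selected) = sweep of the start-sorted bound pairs
lemma pvFinal (s' : PySem.Set Int) (ivs' : List (Int × Int))
    (hnd : List.Nodup s') (hb : ∀ iv ∈ ivs', 0 ≤ iv.1)
    (hrel : ∀ i, i ∈ s' ↔ ∃ iv ∈ ivs', iv.1 ≤ i ∧ i < iv.2) :
    PySem.List.sorted s' (fun x => x) false
      = pvSweep (PySem.List.sorted ivs' (fun iv => iv.1) false) [] 0 := by
  have hpw := PySem.List.sorted_pairwise ivs' (fun iv => iv.1)
  obtain ⟨hp, hm⟩ := pvSweep_spec _ hpw 0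
  have hmem : ∀ i, i ∈ pvSweep (PySem.List.sorted ivs' (fun iv => iv.1) false) [] 0 ↔ i ∈ s' := by
    intro i
    rw [hm i, hrel i]
    constructor
    · rintro ⟨h0, iv, hmi, h⟩
      exact ⟨iv, (PySem.List.mem_sorted _ _ _ _).1 hmi, h⟩
    · rintro ⟨iv, hmi, h1, h2⟩
      exact ⟨by have := hb iv hmi; omega, iv, (PySem.List.mem_sorted _ _ _ _).2 hmi, h1, h2⟩
  have hnd2 : (pvSweep (PySem.List.sorted ivs' (fun iv => iv.1) false) [] 0).Nodup :=
    hp.imp (fun h => ne_of_lt h)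
  have hperm := (List.perm_ext_iff_of_nodup hnd2 hnd).2 hmem
  exact PySem.List.sorted_eq_of_perm_of_pairwise_lt _ _ _ hperm hp

-- ===== VERDICT (by name: the statement is the Claim_ definition above) =====
theorem parse_selection_expression_spec : Claim_equal_parse_selection_expression := by
  intro expression total _ hpre
  unfold Spec_parse_selection_expression
  unfold parse_selection_expression parse_selection_expression_alt
  by_cases hall : PySem.Chars.lower (PySem.Chars.strip expression.toList) = "all".toList
      ∨ PySem.Chars.lower (PySem.Chars.strip expression.toList) = "*".toList
  · rw [if_pos hall, if_pos hall]
  · rw [if_neg hall, if_neg hall]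
    have hok : ∀ p ∈ PySem.Chars.splitOn (PySem.Chars.lower (PySem.Chars.strip expression.toList)) [','],
        pvPartOK p total = true := by
      rcases hpre with h | h | h
      · exact absurd (Or.inl h) hall
      · exact absurd (Or.inr h) hall
      · exact h
    obtain ⟨s', ivs', hA, hB, hnd, hbd, hrel⟩ :=
      pvLoop_rel total _ hok PySem.Set.empty []
        (by simp [PySem.Set.empty]) (by simp) (by simp [PySem.Set.empty])
    rw [hA, hB]
    exact pvFinal s' ivs' hnd hbd hrel
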